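-- pv_equiv track=rewrite | github.com/AngeloMiha/Esercizi | Lezione5/Lezione5.py | count_isolated
-- ===== SOURCE A (Python) =====
-- def count_isolated(lista: list[int]) -> int:
--     isolati = 0
--
--     if lista == []:
--         return isolati
--     else:
--
--         if lista[0] != lista[1]:
--             isolati += 1
--         if lista[-1] != lista[-2]:
--             isolati += 1
--
--         for i in range(1, len(lista) - 1):
--             if lista[i] != lista[i + 1] and lista[i] != lista[i - 1]:
--                 isolati += 1
--         return isolati
-- ===== SOURCE B (Python) =====
-- def count_isolated(lista: list[int]) -> int:
--     # Run-length scan: an element is isolated exactly when it forms a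
--     # maximal run of length 1 (for a 2-element distinct list both runs
--     # are counted, matching the double endpoint check).
--     count = 0
--     run = 0
--     prev = None
--     for x in lista:
--         if run and x == prev:
--             run += 1
--         else:
--             if run == 1:
--                 count += 1
--             run = 1
--             prev = x
--     if run == 1:
--         count += 1
--     return count
-- ===== Notes on version B (the rewrite author's own statement) =====
-- stated objective: alternative
-- what changed: B replaces A's index-based neighbor comparisons (lista[i-1]/lista[i]/lista[i+1] plus explicit endpoint checks with negative indices) by a single run-length scan that keeps a (count, run, prev) state and counts the maximal runs of length exactly 1.
-- crash fix: On single-element lists A raises IndexError (lista[1]); B's run-length scan needs no lookahead and returns 1 there. — e.g. on count_isolated([5]): A raises IndexError, B returns 1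
import Mathlib
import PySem

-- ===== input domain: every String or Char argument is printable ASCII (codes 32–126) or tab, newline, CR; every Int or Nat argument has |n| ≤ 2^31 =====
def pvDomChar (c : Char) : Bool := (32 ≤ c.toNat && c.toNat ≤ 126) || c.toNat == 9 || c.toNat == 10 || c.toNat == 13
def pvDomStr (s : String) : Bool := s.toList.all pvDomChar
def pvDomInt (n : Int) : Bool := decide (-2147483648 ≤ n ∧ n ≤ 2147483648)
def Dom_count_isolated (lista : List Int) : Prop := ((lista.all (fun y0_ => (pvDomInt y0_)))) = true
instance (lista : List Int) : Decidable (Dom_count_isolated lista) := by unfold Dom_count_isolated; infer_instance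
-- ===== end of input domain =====

-- B replaces A's indexed neighbor comparisons by a single run-length scan counting maximal runs of length 1; same O(n) cost.

-- ===== PORT A =====
def count_isolated (lista : List Int) : Int :=
  if lista = [] then 0
  else
    let isolati : Int := 0
    let isolati := if PySem.List.pyGetD lista 0 0 ≠ PySem.List.pyGetD lista 1 0 then isolati + 1 else isolati
    let isolati := if PySem.List.pyGetD lista (-1) 0 ≠ PySem.List.pyGetD lista (-2) 0 then isolati + 1 else isolati
    (PySem.List.pyRange 1 ((lista.length : Int) - 1) 1).foldl
      (fun acc i =>
        if PySem.List.pyGetD lista i 0 ≠ PySem.List.pyGetD lista (i + 1) 0 ∧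
           PySem.List.pyGetD lista i 0 ≠ PySem.List.pyGetD lista (i - 1) 0
        then acc + 1 else acc) isolati

-- ===== PORT B =====
-- transliteration of Source B: state (count, run, prev), one pass, then a final flush
def count_isolated_alt (lista : List Int) : Int :=
  let s : Int × Int × Option Int :=
    lista.foldl
      (fun s x =>
        if s.2.1 ≠ 0 ∧ s.2.2 = some x then (s.1, s.2.1 + 1, s.2.2)
        else ((if s.2.1 = 1 then s.1 + 1 else s.1), 1, some x))
      (0, 0, none)
  if s.2.1 = 1 then s.1 + 1 else s.1

-- ===== PRECONDITION & SPEC =====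
-- Pre_ excludes exactly the singleton lists, on which the Python A raises IndexError (lista[1]); B returns 1 there (see Raises_ below).
def Pre_count_isolated (lista : List Int) : Prop := lista = [] ∨ 2 ≤ lista.length
instance (lista : List Int) : Decidable (Pre_count_isolated lista) := by unfold Pre_count_isolated; infer_instance
def pvWitness_count_isolated : List Int := ([1, 1, 2])

-- On single-element lists A raises IndexError (lista[1]); B's scan needs no lookahead and returns 1.
def Raises_count_isolated (lista : List Int) : Prop := lista.length = 1
instance (lista : List Int) : Decidable (Raises_count_isolated lista) := by unfold Raises_count_isolated; infer_instance
def pvRaiseWitness_count_isolated : List Int := ([5])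
def pvRaiseWitnessOut_count_isolated : Int := 1

def Spec_count_isolated (lista : List Int) (out : Int) : Prop := out = count_isolated_alt lista
instance (lista : List Int) (out : Int) : Decidable (Spec_count_isolated lista out) := by unfold Spec_count_isolated; infer_instance

-- ===== CLAIM (what is proved, stated in full; the proofs are below) =====
def Claim_equal_count_isolated : Prop := ∀ (lista : List Int), Dom_count_isolated lista → Pre_count_isolated lista → Spec_count_isolated lista (count_isolated lista)
def Claim_raises_count_isolated : Prop := (∀ (lista : List Int), Dom_count_isolated lista → Raises_count_isolated lista → ¬ Pre_count_isolated lista) ∧ (Dom_count_isolated (pvRaiseWitness_count_isolated) ∧ Raises_count_isolated (pvRaiseWitness_count_isolated) ∧ count_isolated_alt (pvRaiseWitness_count_isolated) = pvRaiseWitnessOut_count_isolated)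

-- ===== LEMMAS AND PROOFS =====

-- run counter: pvRC flag p m = number of length-1 runs in (run-of-p ++ m), where flag says the pending p-run has length exactly 1
def pvRC (flag : Bool) (p : Int) : List Int → Int
  | [] => if flag then 1 else 0
  | x :: t => if x = p then pvRC false p t else (if flag then 1 else 0) + pvRC true x t

-- last-element check of A, structurally
def pvLC (a b : Int) : List Int → Int
  | [] => if b ≠ a then 1 else 0
  | c :: t => pvLC b c t

-- interior-triple contribution of A
def pvG : (Int × Int) × Int → Int := fun w => if w.1.2 ≠ w.2 ∧ w.1.2 ≠ w.1.1 then 1 else 0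
def pvZ (l : List Int) : List ((Int × Int) × Int) := (l.zip l.tail).zip l.tail.tail

-- B's step function (definitionally the lambda inside count_isolated_alt)
def pvStep : (Int × Int × Option Int) → Int → (Int × Int × Option Int) := fun s x =>
  if s.2.1 ≠ 0 ∧ s.2.2 = some x then (s.1, s.2.1 + 1, s.2.2)
  else ((if s.2.1 = 1 then s.1 + 1 else s.1), 1, some x)

theorem pvRC_true_eq (p : Int) (m : List Int) :
    pvRC true p m = pvRC false p m + (if m.head? = some p then 0 else 1) := by
  cases m with
  | nil => simp [pvRC]
  | cons x t => by_cases h : x = p <;> simp [pvRC, h, add_comm]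

theorem pvGetD_neg_cons (m : List Int) (a : Int) (k : Nat) (hk : 0 < k) (hk2 : k ≤ m.length) :
    PySem.List.pyGetD (a :: m) (-(k : Int)) 0 = PySem.List.pyGetD m (-(k : Int)) 0 := by
  rw [PySem.List.pyGetD_neg_natCast _ _ _ hk (by simpa using Nat.le_succ_of_le hk2),
      PySem.List.pyGetD_neg_natCast _ _ _ hk hk2]
  have h : (a :: m).length - k = (m.length - k) + 1 := by simp; omega
  simp only [h, List.getElem_cons_succ]

theorem pvLC_eq (t : List Int) : ∀ (x y : Int),
    (if PySem.List.pyGetD (x :: y :: t) (-1) 0 ≠ PySem.List.pyGetD (x :: y :: t) (-2) 0 then (1:Int) else 0)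
      = pvLC x y t := by
  induction t with
  | nil =>
    intro x y
    rw [PySem.List.pyGetD_neg_ofNat _ 1 _ (by omega) (by simp),
        PySem.List.pyGetD_neg_ofNat _ 2 _ (by omega) (by simp)]
    simp [pvLC]
  | cons c t' ih =>
    intro x y
    have h1 : PySem.List.pyGetD (x :: y :: c :: t') (-1) 0 = PySem.List.pyGetD (y :: c :: t') (-1) 0 := by
      have := pvGetD_neg_cons (y :: c :: t') x 1 (by omega) (by simp)
      simpa using this
    have h2 : PySem.List.pyGetD (x :: y :: c :: t') (-2) 0 = PySem.List.pyGetD (y :: c :: t') (-2) 0 := by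
      have := pvGetD_neg_cons (y :: c :: t') x 2 (by omega) (by simp)
      simpa using this
    rw [h1, h2, ih y c]
    simp [pvLC]

-- A's value as endpoint checks plus the sum over interior triples
theorem countA_as_sum (l : List Int) (h2 : 2 ≤ l.length) :
    count_isolated l =
      (if PySem.List.pyGetD l 0 0 ≠ PySem.List.pyGetD l 1 0 then (1:Int) else 0) +
      (if PySem.List.pyGetD l (-1) 0 ≠ PySem.List.pyGetD l (-2) 0 then (1:Int) else 0) +
      ((pvZ l).map pvG).sum := by
  have hne : l ≠ [] := by intro h; rw [h] at h2; simp at h2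
  rw [count_isolated, if_neg hne]
  show (PySem.List.pyRange 1 ((l.length : Int) - 1) 1).foldl
      (fun acc i =>
        if PySem.List.pyGetD l i 0 ≠ PySem.List.pyGetD l (i + 1) 0 ∧
           PySem.List.pyGetD l i 0 ≠ PySem.List.pyGetD l (i - 1) 0
        then acc + 1 else acc)
      (if PySem.List.pyGetD l (-1) 0 ≠ PySem.List.pyGetD l (-2) 0 then
        (if PySem.List.pyGetD l 0 0 ≠ PySem.List.pyGetD l 1 0 then (0:Int) + 1 else 0) + 1
       else (if PySem.List.pyGetD l 0 0 ≠ PySem.List.pyGetD l 1 0 then (0:Int) + 1 else 0)) = _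
  rw [PySem.List.foldl_congr_mem _ _
      (fun acc i =>
        acc + (if PySem.List.pyGetD l i 0 ≠ PySem.List.pyGetD l (i + 1) 0 ∧
                  PySem.List.pyGetD l i 0 ≠ PySem.List.pyGetD l (i - 1) 0
               then (1:Int) else 0)) _
      (fun acc i _ => by
        by_cases hc : PySem.List.pyGetD l i 0 ≠ PySem.List.pyGetD l (i + 1) 0 ∧
            PySem.List.pyGetD l i 0 ≠ PySem.List.pyGetD l (i - 1) 0 <;> simp [hc])]
  rw [PySem.List.foldl_add]
  have hmap : (PySem.List.pyRange 1 ((l.length : Int) - 1) 1).map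
      (fun i => if PySem.List.pyGetD l i 0 ≠ PySem.List.pyGetD l (i + 1) 0 ∧
                   PySem.List.pyGetD l i 0 ≠ PySem.List.pyGetD l (i - 1) 0
                then (1:Int) else 0)
      = (pvZ l).map pvG := by
    rw [PySem.List.pyRange_one, List.map_map]
    apply List.ext_getElem
    · simp [pvZ]
      try omega
    · intro k hk1 hk2
      have hk : k + 2 < l.length := by
        simp at hk1; omega
      have e1 : PySem.List.pyGetD l (1 + (k : Int)) 0 = l[k + 1] := by
        rw [PySem.List.pyGetD_eq_getElem l 0 (by omega) (by omega)]
        congr 1; omega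
      have e2 : PySem.List.pyGetD l (1 + (k : Int) + 1) 0 = l[k + 2] := by
        rw [PySem.List.pyGetD_eq_getElem l 0 (by omega) (by omega)]
        congr 1; omega
      have e3 : PySem.List.pyGetD l (1 + (k : Int) - 1) 0 = l[k]'(by omega) := by
        rw [PySem.List.pyGetD_eq_getElem l 0 (by omega) (by omega)]
        congr 1; omega
      simp only [List.getElem_map, List.getElem_range, Function.comp, e1, e2, e3,
        pvZ, pvG, List.getElem_zip, List.getElem_tail]
  rw [hmap]
  split <;> split <;> ring

theorem key (t : List Int) : ∀ (x y : Int),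
    (if x ≠ y then (1:Int) else 0) + pvLC x y t + ((pvZ (x :: y :: t)).map pvG).sum
      = pvRC true x (y :: t) := by
  induction t with
  | nil =>
    intro x y
    by_cases h : x = y <;> simp [pvZ, pvLC, pvRC, h, eq_comm]
  | cons c t' ih =>
    intro x y
    have hz : pvZ (x :: y :: c :: t') = ((x, y), c) :: pvZ (y :: c :: t') := by
      simp [pvZ]
    rw [hz]
    have ihyc := ih y c
    by_cases hxy : y = x
    · subst hxy
      rw [pvRC_true_eq y (c :: t')] at ihyc
      rw [show pvRC true y (y :: c :: t') = pvRC false y (c :: t') from by simp [pvRC]]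
      simp only [pvLC, pvG, List.map_cons, List.sum_cons, List.head?_cons] at ihyc ⊢
      by_cases hyc : y = c <;> simp [hyc, eq_comm] at ihyc ⊢ <;> omega
    · have hxy' : ¬ x = y := fun h => hxy h.symm
      rw [show pvRC true x (y :: c :: t') = 1 + pvRC true y (c :: t') from by
        simp [pvRC, hxy]]
      rw [← ihyc]
      simp only [pvLC, pvG, List.map_cons, List.sum_cons]
      by_cases hyc : y = c
      · have hxc : ¬ x = c := by rw [← hyc]; exact hxy'
        simp [hyc, hxc]
        try omega
      · simp [hyc, hxy']
        try omega

-- B's fold invariant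
theorem countB_inv (m : List Int) : ∀ (c r p : Int), 1 ≤ r →
    (if ((m.foldl pvStep (c, r, some p)).2.1 = 1) then (m.foldl pvStep (c, r, some p)).1 + 1
     else (m.foldl pvStep (c, r, some p)).1) = c + pvRC (decide (r = 1)) p m := by
  induction m with
  | nil =>
    intro c r p hr
    by_cases h : r = 1 <;> simp [pvRC, h]
  | cons x m' ih =>
    intro c r p hr
    by_cases hpx : p = x
    · have hstep : pvStep (c, r, some p) x = (c, r + 1, some p) := by
        simp only [pvStep]
        rw [if_pos ⟨by simp; omega, by simp [hpx]⟩]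
      rw [List.foldl_cons, hstep, ih c (r + 1) p (by omega)]
      have h1 : ¬ (r + 1 = 1) := by omega
      simp [pvRC, hpx, h1]
    · have hstep : pvStep (c, r, some p) x = ((if r = 1 then c + 1 else c), 1, some x) := by
        simp only [pvStep]
        rw [if_neg]
        rintro ⟨-, hh⟩
        exact hpx (by simpa using hh)
      rw [List.foldl_cons, hstep, ih _ 1 x (by omega)]
      have hxp : ¬ x = p := fun h => hpx h.symm
      by_cases h : r = 1 <;> simp [pvRC, hxp, h]
      try omega

theorem countB_eq (x : Int) (t : List Int) :
    count_isolated_alt (x :: t) = pvRC true x t := by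
  rw [count_isolated_alt]
  show (if (((x :: t).foldl pvStep (0, 0, none)).2.1 = 1)
        then ((x :: t).foldl pvStep (0, 0, none)).1 + 1
        else ((x :: t).foldl pvStep (0, 0, none)).1) = pvRC true x t
  rw [show (x :: t).foldl pvStep (0, 0, none) = t.foldl pvStep (0, 1, some x) from by
    simp [pvStep]]
  rw [countB_inv t 0 1 x (by omega)]
  simp

-- ===== VERDICT (by name: the statement is the Claim_ definition above) =====
theorem count_isolated_spec : Claim_equal_count_isolated := by
  intro lista _ hpre
  unfold Spec_count_isolated
  rcases hpre with h | h
  · subst h; rfl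
  · cases lista with
    | nil => simp at h
    | cons x t =>
      cases t with
      | nil => simp at h
      | cons y t =>
        rw [countA_as_sum _ h, countB_eq]
        have h0 : PySem.List.pyGetD (x :: y :: t) 0 0 = x := by
          rw [PySem.List.pyGetD_eq_getElem _ 0 (by omega) (by omega)]
          simp
        have h1 : PySem.List.pyGetD (x :: y :: t) 1 0 = y := by
          rw [PySem.List.pyGetD_eq_getElem _ 0 (by omega) (by omega)]
          simp
        rw [h0, h1, add_assoc, ← key t x y, pvLC_eq t x y]
        ring

theorem count_isolated_raises : Claim_raises_count_isolated := by
  unfold Claim_raises_count_isolated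
  constructor
  · intro lista _ hr
    unfold Raises_count_isolated at hr
    unfold Pre_count_isolated
    rintro (h | h)
    · simp [h] at hr
    · omega
  · decide

theorem count_isolated_raises_ok :
    count_isolated_alt pvRaiseWitness_count_isolated = pvRaiseWitnessOut_count_isolated :=
  count_isolated_raises.2.2.2
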